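-- pv_equiv track=rewrite | github.com/ErickTola/APS_Criptografia | Soma_de_votos.py | converte_txt_p_lista
-- ===== SOURCE A (Python) =====
-- def converte_txt_p_lista(texto_criptografado_raw):
--     # Converte um aquivo de texto para número e o anexa a uma lista
--     texto_criptografado = []
--     texto_tmp = ''
--
--     for i in texto_criptografado_raw:
--         if i == '[' or (i == " "):
--             continue
--         elif i == ',' or i == ']':
--             texto_criptografado.append(int(texto_tmp))
--             texto_tmp = ''
--             continue
--         else:
--             texto_tmp = texto_tmp + i
--     return texto_criptografado
-- ===== SOURCE B (Python) =====
-- def converte_txt_p_lista(texto_criptografado_raw):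
--     # Clean-then-split pipeline: drop '[' and spaces, unify ']' with ',' as the
--     # delimiter, split once, convert every token except the trailing remainder.
--     limpo = texto_criptografado_raw.replace('[', '').replace(' ', '').replace(']', ',')
--     partes = limpo.split(',')
--     return [int(p) for p in partes[:-1]]
-- ===== Notes on version B (the rewrite author's own statement) =====
-- stated objective: idiomatic
-- what changed: Replaced A's stateful character-by-character buffer loop with a clean-then-split pipeline: globally delete '[' and spaces, rewrite ']' to ',', split once on ',', and convert every token except the trailing remainder.
import Mathlib
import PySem

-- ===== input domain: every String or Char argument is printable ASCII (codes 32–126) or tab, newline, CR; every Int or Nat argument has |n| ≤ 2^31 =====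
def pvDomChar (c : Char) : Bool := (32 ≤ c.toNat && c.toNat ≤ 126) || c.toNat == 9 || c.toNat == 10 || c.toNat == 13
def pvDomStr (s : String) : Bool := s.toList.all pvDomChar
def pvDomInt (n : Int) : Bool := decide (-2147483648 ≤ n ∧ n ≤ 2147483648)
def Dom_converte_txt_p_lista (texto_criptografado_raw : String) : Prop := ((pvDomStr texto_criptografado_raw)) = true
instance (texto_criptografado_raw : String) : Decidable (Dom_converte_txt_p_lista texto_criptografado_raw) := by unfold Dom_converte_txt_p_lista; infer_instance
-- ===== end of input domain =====

-- B replaces A's stateful one-character buffer loop by a clean-then-split-then-convert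
-- pipeline (strip '[' and spaces, turn ']' into ',', split on ',', convert all but the
-- trailing remainder); objective: idiomatic.

-- ===== PORT A =====
-- int(texto_tmp) raises ValueError when the buffer is not an int literal; those inputs
-- are excluded by Pre_ below, so the `.getD 0` default never fires inside the claim.
def convStepA : (List Int × List Char) → Char → (List Int × List Char)
  | (acc, tmp), i =>
    if i = '[' ∨ i = ' ' then (acc, tmp)
    else if i = ',' ∨ i = ']' then (acc ++ [(PySem.Int.ofChars? tmp).getD 0], [])
    else (acc, tmp ++ [i])

def converte_txt_p_lista (texto_criptografado_raw : String) : List Int :=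
  (texto_criptografado_raw.toList.foldl convStepA ([], [])).1

-- ===== PORT B =====
def converte_txt_p_lista_alt (texto_criptografado_raw : String) : List Int :=
  let limpo := PySem.Str.replace (PySem.Str.replace
      (PySem.Str.replace texto_criptografado_raw "[" "") " " "") "]" ","
  let partes := (PySem.Str.split? limpo ",").getD []
  (PySem.List.slice partes none (some (-1))).map (fun p => (PySem.Int.ofStr? p).getD 0)

-- ===== PRECONDITION & SPEC =====
-- Helpers describing the tokenization (used only by Pre_ and the proofs, by neither port):
-- pvNorm drops '[' and ' ' and renames ']' to ','; pvSp1 splits on ','.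
def pvNorm (cs : List Char) : List Char :=
  (cs.filter (fun c => !(c = '[' || c = ' '))).map (fun c => if c = ']' then ',' else c)

def pvSp1 : List Char → List Char → List (List Char)
  | [], cur => [cur.reverse]
  | x :: rest, cur => if x = ',' then cur.reverse :: pvSp1 rest [] else pvSp1 rest (x :: cur)

-- Pre_ excludes exactly the inputs on which Python A raises ValueError: some token
-- (the cleaned text between consecutive delimiters ','/']') is not a valid int literal.
def Pre_converte_txt_p_lista (texto_criptografado_raw : String) : Prop :=
  ∀ t ∈ (pvSp1 (pvNorm texto_criptografado_raw.toList) []).dropLast,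
    PySem.Int.ofChars? t ≠ none

instance (texto_criptografado_raw : String) : Decidable (Pre_converte_txt_p_lista texto_criptografado_raw) := by
  unfold Pre_converte_txt_p_lista; infer_instance

def pvWitness_converte_txt_p_lista : String := "[10, -2, 3]"

def Spec_converte_txt_p_lista (texto_criptografado_raw : String) (out : List Int) : Prop := out = converte_txt_p_lista_alt texto_criptografado_raw
instance (texto_criptografado_raw : String) (out : List Int) : Decidable (Spec_converte_txt_p_lista texto_criptografado_raw out) := by unfold Spec_converte_txt_p_lista; infer_instance

-- ===== CLAIM (what is proved, stated in full; the proofs are below) =====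
def Claim_equal_converte_txt_p_lista : Prop := ∀ (texto_criptografado_raw : String), Dom_converte_txt_p_lista texto_criptografado_raw → Pre_converte_txt_p_lista texto_criptografado_raw → Spec_converte_txt_p_lista texto_criptografado_raw (converte_txt_p_lista texto_criptografado_raw)

-- ===== LEMMAS AND PROOFS =====
def pvToInt (t : List Char) : Int := (PySem.Int.ofChars? t).getD 0

theorem pvSp1_ne_nil (l cur : List Char) : pvSp1 l cur ≠ [] := by
  induction l generalizing cur with
  | nil => simp [pvSp1]
  | cons x rest ih =>
    by_cases hx : x = ',' <;> simp [pvSp1, hx, ih]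

-- splitOn.go with the single-character separator "," computes pvSp1.
theorem pvGo1 (fuel : Nat) (l cur : List Char) (acc : List (List Char))
    (h : l.length ≤ fuel) :
    PySem.Chars.splitOn.go [','] fuel l cur acc = acc.reverse ++ pvSp1 l cur := by
  induction fuel generalizing l cur acc with
  | zero =>
    have : l = [] := by cases l <;> simp_all
    subst this
    rw [PySem.Chars.splitOn.go.eq_def]
    simp [pvSp1]
  | succ n ih =>
    cases l with
    | nil =>
      rw [PySem.Chars.splitOn.go.eq_def]
      simp [pvSp1]
    | cons c rest =>
      have hgo : PySem.Chars.splitOn.go [','] (n+1) (c::rest) cur acc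
          = if [','].isPrefixOf (c :: rest) = true
            then PySem.Chars.splitOn.go [','] n rest [] (cur.reverse :: acc)
            else PySem.Chars.splitOn.go [','] n rest (c :: cur) acc := rfl
      rw [hgo]
      simp only [List.length_cons] at h
      by_cases hc : c = ','
      · subst hc
        rw [if_pos (by simp [List.isPrefixOf]), ih rest [] (cur.reverse :: acc) (by omega)]
        simp [pvSp1]
      · have hp : ¬ (([','] : List Char).isPrefixOf (c :: rest) = true) := by
          simp [List.isPrefixOf]
          intro h'; exact hc h'.symm
        rw [if_neg hp, ih rest (c :: cur) acc (by omega)]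
        simp [pvSp1, hc]

theorem pvSplitOn_comma (l : List Char) :
    PySem.Chars.splitOn l [','] = pvSp1 l [] := by
  unfold PySem.Chars.splitOn
  rw [pvGo1 (l.length + 1) l [] [] (by omega)]
  simp

-- replace.go with a single-character pattern is a flatMap.
theorem pvRepGo (o : Char) (new : List Char) (fuel : Nat) (l acc : List Char)
    (h : l.length ≤ fuel) :
    PySem.Chars.replace.go [o] new fuel l acc
      = acc.reverse ++ l.flatMap (fun x => if x = o then new else [x]) := by
  induction fuel generalizing l acc with
  | zero =>
    have : l = [] := by cases l <;> simp_all
    subst this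
    rw [PySem.Chars.replace.go.eq_def]; simp
  | succ n ih =>
    cases l with
    | nil => rw [PySem.Chars.replace.go.eq_def]; simp
    | cons c rest =>
      have hgo : PySem.Chars.replace.go [o] new (n+1) (c::rest) acc
          = if [o].isPrefixOf (c :: rest) = true
            then PySem.Chars.replace.go [o] new n rest (new.reverse ++ acc)
            else PySem.Chars.replace.go [o] new n rest (c :: acc) := rfl
      rw [hgo]
      simp only [List.length_cons] at h
      by_cases hc : c = o
      · subst hc
        rw [if_pos (by simp [List.isPrefixOf]), ih rest (new.reverse ++ acc) (by omega)]
        simp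
      · have hp : ¬ (([o] : List Char).isPrefixOf (c :: rest) = true) := by
          simp [List.isPrefixOf]
          intro h'; exact hc h'.symm
        rw [if_neg hp, ih rest (c :: acc) (by omega)]
        simp [hc]

theorem pvReplace1 (o : Char) (new : List Char) (l : List Char) :
    PySem.Chars.replace l [o] new = l.flatMap (fun x => if x = o then new else [x]) := by
  unfold PySem.Chars.replace
  rw [if_neg (by simp), pvRepGo o new l.length l [] (by omega)]
  simp

-- The three replacements compose to pvNorm.
theorem pvPipe (l : List Char) :
    ((l.flatMap (fun x => if x = '[' then [] else [x])).flatMap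
        (fun x => if x = ' ' then [] else [x])).flatMap
        (fun x => if x = ']' then [','] else [x]) = pvNorm l := by
  induction l with
  | nil => simp [pvNorm]
  | cons c rest ih =>
    simp only [List.flatMap_cons, List.flatMap_append] at *
    by_cases h1 : c = '[' <;> by_cases h2 : c = ' ' <;> by_cases h3 : c = ']' <;>
      simp_all [pvNorm, List.filter_cons]

-- The invariant of A's character loop: it computes the converted non-final tokens
-- of the cleaned text, with the final token left in the buffer.
theorem pvLoopA (l : List Char) (acc : List Int) (tmp : List Char) :
    l.foldl convStepA (acc, tmp)
      = (acc ++ ((pvSp1 (pvNorm l) tmp.reverse).dropLast).map pvToInt,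
         (pvSp1 (pvNorm l) tmp.reverse).getLastD []) := by
  induction l generalizing acc tmp with
  | nil => simp [pvNorm, pvSp1]
  | cons c rest ih =>
    by_cases h1 : c = '[' ∨ c = ' '
    · have hn : pvNorm (c :: rest) = pvNorm rest := by
        rcases h1 with h | h <;> simp [pvNorm, h]
      have hstep : convStepA (acc, tmp) c = (acc, tmp) := by
        simp [convStepA, if_pos h1]
      rw [List.foldl_cons, hstep, ih, hn]
    · by_cases h2 : c = ',' ∨ c = ']'
      · have hn : pvNorm (c :: rest) = ',' :: pvNorm rest := by
          rcases h2 with h | h <;>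
            simp_all [pvNorm]
        have hne := pvSp1_ne_nil (pvNorm rest) []
        have hstep : convStepA (acc, tmp) c = (acc ++ [pvToInt tmp], []) := by
          simp [convStepA, if_neg h1, if_pos h2, pvToInt]
        rw [List.foldl_cons, hstep, ih]
        have hsp : pvSp1 (pvNorm (c :: rest)) tmp.reverse
            = tmp :: pvSp1 (pvNorm rest) [] := by
          rw [hn]; simp [pvSp1]
        rw [hsp, List.reverse_nil, List.dropLast_cons_of_ne_nil hne]
        cases hpv : pvSp1 (pvNorm rest) [] with
        | nil => exact absurd hpv hne
        | cons a t => simp [List.getLastD]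
      · have hc1 : ¬ c = '[' := fun h => h1 (Or.inl h)
        have hc2 : ¬ c = ' ' := fun h => h1 (Or.inr h)
        have hc3 : ¬ c = ',' := fun h => h2 (Or.inl h)
        have hc4 : ¬ c = ']' := fun h => h2 (Or.inr h)
        have hn : pvNorm (c :: rest) = c :: pvNorm rest := by
          simp [pvNorm, hc1, hc2, hc4]
        have hstep : convStepA (acc, tmp) c = (acc, tmp ++ [c]) := by
          simp [convStepA, if_neg h1, if_neg h2]
        rw [List.foldl_cons, hstep, ih]
        have hsp : pvSp1 (pvNorm (c :: rest)) tmp.reverse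
            = pvSp1 (pvNorm rest) (tmp ++ [c]).reverse := by
          rw [hn]; simp [pvSp1, hc3]
        rw [hsp]

theorem pvA_eq (s : String) :
    converte_txt_p_lista s
      = ((pvSp1 (pvNorm s.toList) []).dropLast).map pvToInt := by
  unfold converte_txt_p_lista
  rw [pvLoopA]
  simp

theorem pvB_eq (s : String) :
    converte_txt_p_lista_alt s
      = ((pvSp1 (pvNorm s.toList) []).dropLast).map pvToInt := by
  have e1 : ("[".toList : List Char) = ['['] := rfl
  have e2 : (" ".toList : List Char) = [' '] := rfl
  have e3 : ("]".toList : List Char) = [']'] := rfl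
  have e4 : (",".toList : List Char) = [','] := rfl
  have e5 : ("".toList : List Char) = [] := rfl
  have hlimpo : (PySem.Str.replace (PySem.Str.replace
      (PySem.Str.replace s "[" "") " " "") "]" ",").toList = pvNorm s.toList := by
    rw [PySem.Str.toList_replace, PySem.Str.toList_replace, PySem.Str.toList_replace,
      e1, e2, e3, e4, e5]
    rw [pvReplace1, pvReplace1, pvReplace1]
    exact pvPipe s.toList
  have hsplit : PySem.Str.split? (PySem.Str.replace (PySem.Str.replace
      (PySem.Str.replace s "[" "") " " "") "]" ",") ","
      = some ((pvSp1 (pvNorm s.toList) []).map String.ofList) := by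
    unfold PySem.Str.split? PySem.Chars.split?
    rw [if_neg (by rw [e4]; simp)]
    rw [hlimpo, e4, pvSplitOn_comma]
    rfl
  show (PySem.List.slice ((PySem.Str.split? (PySem.Str.replace (PySem.Str.replace
      (PySem.Str.replace s "[" "") " " "") "]" ",") ",").getD []) none (some (-1))).map
      (fun p => (PySem.Int.ofStr? p).getD 0)
    = ((pvSp1 (pvNorm s.toList) []).dropLast).map pvToInt
  rw [hsplit, Option.getD_some, PySem.List.slice_to_neg_one,
    ← List.map_dropLast, List.map_map]
  refine List.map_congr_left (fun t _ => ?_)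
  simp [pvToInt, PySem.Int.ofStr?_ofList, Function.comp]

-- ===== VERDICT (by name: the statement is the Claim_ definition above) =====
theorem converte_txt_p_lista_spec : Claim_equal_converte_txt_p_lista := by
  intro s _ _
  unfold Spec_converte_txt_p_lista
  rw [pvA_eq, pvB_eq]
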